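-- pv_equiv track=rewrite | github.com/Sonypriyasonu/Python-Practice | LetterShift.py | threeshift
-- ===== SOURCE A (Python) =====
-- def threeshift(s):
--     l=[]
--
--     if len(s)<3:
--         return l
--     else:
--         for i in range(len(s)-2):
--             l+=[s[i:i+3]]
--
--         k=sorted(l)
--         return k
-- ===== SOURCE B (Python) =====
-- def threeshift(s):
--     # radix/bucket sort over the 3 fixed character positions instead of comparison sort
--     if len(s) < 3:
--         return []
--     subs = [s[i:i+3] for i in range(len(s) - 2)]
--     for pos in (2, 1, 0):
--         buckets = [[] for _ in range(128)]
--         for t in subs: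
--             buckets[ord(t[pos])].append(t)
--         subs = [t for b in buckets for t in b]
--     return subs
-- ===== Notes on version B (the rewrite author's own statement) =====
-- stated objective: alternative
-- what changed: Replaces the comparison sort (sorted()) of the 3-char substrings by a 3-pass LSD radix/bucket sort keyed on the fixed character positions (codes 0..127), which is O(n) in the number of substrings.
import Mathlib
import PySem

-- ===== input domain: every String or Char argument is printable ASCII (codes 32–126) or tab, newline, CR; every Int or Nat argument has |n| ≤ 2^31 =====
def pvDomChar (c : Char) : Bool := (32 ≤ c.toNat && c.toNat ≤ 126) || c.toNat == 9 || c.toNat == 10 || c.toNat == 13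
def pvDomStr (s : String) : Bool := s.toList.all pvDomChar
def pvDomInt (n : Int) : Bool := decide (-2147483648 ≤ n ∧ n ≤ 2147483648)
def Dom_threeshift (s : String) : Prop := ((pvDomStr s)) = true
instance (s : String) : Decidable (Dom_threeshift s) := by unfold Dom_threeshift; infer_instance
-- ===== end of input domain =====

-- B replaces A's comparison sort of the 3-char substrings by a 3-pass LSD bucket sort on the
-- fixed character positions (ASCII codes 0..127); same return value, different algorithm.

-- ===== PORT A =====
def threeshift (s : String) : List String :=
  let l : List String := []
  if PySem.Str.len s < 3 then l
  else
    let l := (PySem.List.pyRange 0 (PySem.Str.len s - 2)).foldl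
      (fun acc i => acc ++ [PySem.Str.slice s (some i) (some (i + 3))]) l
    PySem.List.sorted l (fun x => x)

-- ===== PORT B =====
-- one bucket pass: buckets = [[] for _ in range(128)]; for t in subs: buckets[ord(t[pos])].append(t);
-- subs = [t for b in buckets for t in b].  t[pos] is ported as getD (every substring has
-- length 3, so pos ∈ {0,1,2} is in range); buckets[k].append(t) is ported as set k (getD k ++ [t])
def pvBucketStep (pos : Nat) (bs : List (List (List Char))) (t : List Char) : List (List (List Char)) :=
  bs.set ((t.getD pos (Char.ofNat 0)).toNat) (bs.getD ((t.getD pos (Char.ofNat 0)).toNat) [] ++ [t])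

def pvBucketPass (pos : Nat) (ts : List (List Char)) : List (List Char) :=
  (ts.foldl (pvBucketStep pos) (List.replicate 128 [])).flatten

def threeshift_alt (s : String) : List String :=
  let cs := s.toList
  if cs.length < 3 then []
  else
    let subs := (List.range (cs.length - 2)).map
      (fun (i : Nat) => PySem.List.slice cs (some ((i : Int))) (some ((i : Int) + 3)))
    (pvBucketPass 0 (pvBucketPass 1 (pvBucketPass 2 subs))).map String.ofList

-- ===== PRECONDITION & SPEC =====
def Spec_threeshift (s : String) (out : List String) : Prop := out = threeshift_alt s
instance (s : String) (out : List String) : Decidable (Spec_threeshift s out) := by unfold Spec_threeshift; infer_instance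

-- ===== CLAIM (what is proved, stated in full; the proofs are below) =====
def Claim_equal_threeshift : Prop := ∀ (s : String), Dom_threeshift s → Spec_threeshift s (threeshift s)

-- ===== LEMMAS AND PROOFS =====

-- proof-side characterisation of one bucket pass: bucket c collects exactly the elements with code c
def pvPassSpec (pos : Nat) (ts : List (List Char)) : List (List Char) :=
  (List.range 128).flatMap (fun code => ts.filter (fun t => (t.getD pos (Char.ofNat 0)).toNat == code))

theorem pvFold_length (pos : Nat) (ts : List (List Char)) (bs : List (List (List Char))) :
    (ts.foldl (pvBucketStep pos) bs).length = bs.length := by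
  induction ts generalizing bs with
  | nil => rfl
  | cons t ts ih => rw [List.foldl_cons, ih, pvBucketStep, List.length_set]

theorem pvFold_getD (pos : Nat) (ts : List (List Char)) :
    ∀ (bs : List (List (List Char))), bs.length = 128 →
    (∀ t ∈ ts, (t.getD pos (Char.ofNat 0)).toNat < 128) →
    ∀ c, (ts.foldl (pvBucketStep pos) bs).getD c []
      = bs.getD c [] ++ ts.filter (fun t => (t.getD pos (Char.ofNat 0)).toNat == c) := by
  induction ts with
  | nil => intro bs _ _ c; simp
  | cons t ts ih =>
    intro bs hlen hcodes c
    have hk : (t.getD pos (Char.ofNat 0)).toNat < 128 := hcodes t (List.mem_cons_self)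
    rw [List.foldl_cons]
    rw [ih (pvBucketStep pos bs t) (by rw [pvBucketStep, List.length_set]; exact hlen)
        (fun u hu => hcodes u (List.mem_cons_of_mem t hu)) c]
    rw [List.filter_cons]
    by_cases hc : (t.getD pos (Char.ofNat 0)).toNat = c
    · rw [if_pos (beq_iff_eq.mpr hc)]
      have : (pvBucketStep pos bs t).getD c [] = bs.getD c [] ++ [t] := by
        rw [pvBucketStep, ← hc]
        rw [List.getD_eq_getElem?_getD, List.getElem?_set_self (by omega), List.getD_eq_getElem?_getD]
        simp
      rw [this, List.append_assoc, List.singleton_append]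
    · rw [if_neg (fun h => hc (beq_iff_eq.mp h))]
      have : (pvBucketStep pos bs t).getD c [] = bs.getD c [] := by
        rw [pvBucketStep, List.getD_eq_getElem?_getD, List.getElem?_set_ne (by omega),
            ← List.getD_eq_getElem?_getD]
      rw [this]

theorem pvFlatten_eq_flatMap (l : List (List (List Char))) :
    l.flatten = (List.range l.length).flatMap (fun c => l.getD c []) := by
  have h : (List.range l.length).map (fun c => l.getD c []) = l := by
    apply List.ext_getElem
    · simp
    · intro i h1 h2
      simp [List.getD_eq_getElem?_getD, List.getElem?_eq_getElem h2]
  rw [List.flatMap_def, h]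

theorem pvBucketPass_eq (pos : Nat) (ts : List (List Char))
    (hcodes : ∀ t ∈ ts, (t.getD pos (Char.ofNat 0)).toNat < 128) :
    pvBucketPass pos ts = pvPassSpec pos ts := by
  rw [pvBucketPass, pvFlatten_eq_flatMap, pvFold_length, List.length_replicate, pvPassSpec]
  simp only [List.flatMap_def]
  congr 1
  apply List.map_congr_left
  intro c _
  rw [pvFold_getD pos ts _ (by simp) hcodes c, List.getD_eq_getElem?_getD,
      List.getElem?_replicate]
  split <;> simp

theorem pvMem_pass {pos : Nat} {ts : List (List Char)} {x : List Char}
    (h : x ∈ pvPassSpec pos ts) : x ∈ ts := by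
  simp only [pvPassSpec, List.mem_flatMap, List.mem_filter] at h
  obtain ⟨_, _, hx, _⟩ := h
  exact hx

theorem pvSum_ite_eq {C : Nat} (k : Nat) (l : List Nat) (hn : l.Nodup) (hm : k ∈ l) :
    (l.map (fun c => if k = c then C else 0)).sum = C := by
  induction l with
  | nil => cases hm
  | cons a l ih =>
    simp only [List.map_cons, List.sum_cons]
    rcases List.mem_cons.mp hm with rfl | hm'
    · rw [if_pos rfl]
      have hz : (l.map (fun c => if k = c then C else 0)).sum = 0 := by
        apply List.sum_eq_zero; intro x hx
        obtain ⟨c, hc, rfl⟩ := List.mem_map.mp hx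
        have hkc : k ≠ c := fun hkc => (List.nodup_cons.mp hn).1 (hkc ▸ hc)
        rw [if_neg hkc]
      rw [hz, Nat.add_zero]
    · have hka : k ≠ a := by
        rintro rfl; exact (List.nodup_cons.mp hn).1 hm'
      rw [if_neg hka, ih (List.nodup_cons.mp hn).2 hm', Nat.zero_add]

theorem pvPass_perm (pos : Nat) (ts : List (List Char))
    (h : ∀ t ∈ ts, (t.getD pos (Char.ofNat 0)).toNat < 128) :
    (pvPassSpec pos ts).Perm ts := by
  rw [List.perm_iff_count]
  intro x
  by_cases hx : x ∈ ts
  · have hk := h x hx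
    rw [pvPassSpec, List.count_flatMap]
    have hcongr : (List.range 128).map (List.count x ∘ fun code =>
          ts.filter (fun t => (t.getD pos (Char.ofNat 0)).toNat == code))
        = (List.range 128).map
          (fun code => if (x.getD pos (Char.ofNat 0)).toNat = code then List.count x ts else 0) := by
      apply List.map_congr_left
      intro code _
      by_cases hc : (x.getD pos (Char.ofNat 0)).toNat = code
      · simp only [Function.comp, if_pos hc]
        exact List.count_filter (by simp only [beq_iff_eq]; exact hc)
      · simp only [Function.comp, if_neg hc]
        apply List.count_eq_zero_of_not_mem
        intro hmem
        exact hc (by simpa using (List.mem_filter.mp hmem).2)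
    rw [hcongr, pvSum_ite_eq _ _ (List.nodup_range) (List.mem_range.mpr hk)]
  · rw [List.count_eq_zero_of_not_mem hx, List.count_eq_zero_of_not_mem]
    intro hmem; exact hx (pvMem_pass hmem)

theorem pvChar_lt_of_toNat_lt {c d : Char} (h : c.toNat < d.toNat) : c < d := by
  rw [Char.lt_def, UInt32.lt_iff_toNat_lt]; exact h

theorem pvPass_pairwise (pos : Nat) (ts : List (List Char))
    (hlen : ∀ t ∈ ts, pos < t.length)
    (hp : ts.Pairwise (fun a b => ¬ (b.drop (pos + 1) < a.drop (pos + 1)))) :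
    (pvPassSpec pos ts).Pairwise (fun a b => ¬ (b.drop pos < a.drop pos)) := by
  rw [pvPassSpec, List.pairwise_flatMap]
  constructor
  · intro code _
    apply (hp.filter _).imp_of_mem
    intro a b ha hb hab
    obtain ⟨haM, haC⟩ := List.mem_filter.mp ha
    obtain ⟨hbM, hbC⟩ := List.mem_filter.mp hb
    have hla := hlen a haM
    have hlb := hlen b hbM
    have hga : a.getD pos (Char.ofNat 0) = a[pos] := List.getD_eq_getElem a _ hla
    have hgb : b.getD pos (Char.ofNat 0) = b[pos] := List.getD_eq_getElem b _ hlb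
    have heq : b[pos] = a[pos] := by
      apply Char.ext
      apply UInt32.toNat_inj.mp
      have h1 : (a[pos]'hla).toNat = code := by rw [← hga]; exact beq_iff_eq.mp haC
      have h2 : (b[pos]'hlb).toNat = code := by rw [← hgb]; exact beq_iff_eq.mp hbC
      exact h2.trans h1.symm
    rw [List.drop_eq_getElem_cons hla, List.drop_eq_getElem_cons hlb, heq]
    intro hlt
    rcases List.cons_lt_cons_iff.mp hlt with hc | ⟨_, htail⟩
    · exact lt_irrefl _ hc
    · exact hab htail
  · apply List.pairwise_lt_range.imp
    intro c1 c2 h12 x hx y hy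
    obtain ⟨hxM, hxC⟩ := List.mem_filter.mp hx
    obtain ⟨hyM, hyC⟩ := List.mem_filter.mp hy
    have hlx := hlen x hxM
    have hly := hlen y hyM
    have h1 : (x[pos]'hlx).toNat = c1 := by
      rw [← List.getD_eq_getElem x (Char.ofNat 0) hlx]; exact beq_iff_eq.mp hxC
    have h2 : (y[pos]'hly).toNat = c2 := by
      rw [← List.getD_eq_getElem y (Char.ofNat 0) hly]; exact beq_iff_eq.mp hyC
    have hcc : x[pos]'hlx < y[pos]'hly := pvChar_lt_of_toNat_lt (by omega)
    rw [List.drop_eq_getElem_cons hlx, List.drop_eq_getElem_cons hly]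
    intro hlt
    rcases List.cons_lt_cons_iff.mp hlt with hc | ⟨hceq, _⟩
    · exact absurd hcc (lt_asymm hc)
    · rw [hceq] at hcc; exact lt_irrefl _ hcc

-- every substring in B's list has length 3 and only chars of s
theorem pvSubs_facts (s : String) (hdom : Dom_threeshift s) (h3 : 3 ≤ s.toList.length) :
    ∀ t ∈ (List.range (s.toList.length - 2)).map
      (fun (i : Nat) => PySem.List.slice s.toList (some ((i : Int))) (some ((i : Int) + 3))),
      t.length = 3 ∧ ∀ c ∈ t, c.toNat < 128 := by
  intro t ht
  simp only [List.mem_map, List.mem_range] at ht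
  obtain ⟨i, hi, rfl⟩ := ht
  constructor
  · rw [PySem.List.slice_toNat _ (by positivity) (by positivity)]
    have h1 : ((i : Int)).toNat = i := by omega
    have h2 : ((i : Int) + 3).toNat = i + 3 := by omega
    rw [h1, h2]
    simp only [List.length_take, List.length_drop]
    omega
  · intro c hc
    have hcs : c ∈ s.toList := PySem.List.mem_of_mem_slice _ _ _ hc
    have := (List.all_eq_true.mp hdom) c hcs
    simp only [pvDomChar, Bool.or_eq_true, Bool.and_eq_true, decide_eq_true_eq, beq_iff_eq] at this
    omega

theorem pvGetD_code_lt {pos : Nat} {t : List Char} (hlen : pos < t.length)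
    (hch : ∀ c ∈ t, c.toNat < 128) : (t.getD pos (Char.ofNat 0)).toNat < 128 := by
  rw [List.getD_eq_getElem t _ hlen]
  exact hch _ (List.getElem_mem hlen)

-- ===== VERDICT (by name: the statement is the Claim_ definition above) =====
theorem threeshift_spec : Claim_equal_threeshift := by
  intro s hdom
  unfold Spec_threeshift threeshift threeshift_alt
  by_cases hlt : s.toList.length < 3
  · rw [if_pos, if_pos hlt]
    have : PySem.Str.len s = (s.toList.length : Int) := by simp [PySem.Str.len_eq]
    rw [this]; exact_mod_cast hlt
  · have h3 : 3 ≤ s.toList.length := by omega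
    rw [if_neg, if_neg hlt]
    swap
    · have : PySem.Str.len s = (s.toList.length : Int) := by simp [PySem.Str.len_eq]
      rw [this]; omega
    -- name B's substring list
    set subs := (List.range (s.toList.length - 2)).map
      (fun (i : Nat) => PySem.List.slice s.toList (some ((i : Int))) (some ((i : Int) + 3))) with hsubs
    -- A's accumulated list equals subs.map String.ofList
    have hA : (PySem.List.pyRange 0 (PySem.Str.len s - 2)).foldl
        (fun acc i => acc ++ [PySem.Str.slice s (some i) (some (i + 3))]) []
        = subs.map String.ofList := by
      rw [PySem.List.foldl_append_singleton_eq_map, List.nil_append]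
      have hlen' : PySem.Str.len s = (s.toList.length : Int) := by simp [PySem.Str.len_eq]
      rw [hlen', PySem.List.pyRange_one]
      have htn : (((s.toList.length : Int) - 2) - 0).toNat = s.toList.length - 2 := by omega
      rw [htn, hsubs, List.map_map, List.map_map]
      apply List.map_congr_left
      intro i _
      simp only [Function.comp, zero_add]
      have ht := PySem.Str.toList_slice s (some ((i : Int))) (some ((i : Int) + 3))
      rw [PySem.Chars.slice_eq_listSlice] at ht
      rw [← ht, String.ofList_toList]
    rw [hA]
    show PySem.List.sorted (subs.map String.ofList) (fun x => x)
        = (pvBucketPass 0 (pvBucketPass 1 (pvBucketPass 2 subs))).map String.ofList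
    -- facts about subs
    have hfacts := pvSubs_facts s hdom h3
    rw [← hsubs] at hfacts
    -- replace each bucket pass by its flatMap/filter characterisation
    rw [pvBucketPass_eq 2 subs
      (fun t ht => pvGetD_code_lt (by have := (hfacts t ht).1; omega) (hfacts t ht).2)]
    have hsub2 : ∀ t ∈ pvPassSpec 2 subs, t.length = 3 ∧ ∀ c ∈ t, c.toNat < 128 :=
      fun t ht => hfacts t (pvMem_pass ht)
    rw [pvBucketPass_eq 1 _
      (fun t ht => pvGetD_code_lt (by have := (hsub2 t ht).1; omega) (hsub2 t ht).2)]
    have hsub1 : ∀ t ∈ pvPassSpec 1 (pvPassSpec 2 subs), t.length = 3 ∧ ∀ c ∈ t, c.toNat < 128 :=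
      fun t ht => hsub2 t (pvMem_pass ht)
    rw [pvBucketPass_eq 0 _
      (fun t ht => pvGetD_code_lt (by have := (hsub1 t ht).1; omega) (hsub1 t ht).2)]
    -- permutation
    have hperm : (pvPassSpec 0 (pvPassSpec 1 (pvPassSpec 2 subs))).Perm subs := by
      refine ((pvPass_perm 0 _ ?_).trans ((pvPass_perm 1 _ ?_).trans (pvPass_perm 2 _ ?_)))
      · exact fun t ht => pvGetD_code_lt (by have := (hsub1 t ht).1; omega) (hsub1 t ht).2
      · exact fun t ht => pvGetD_code_lt (by have := (hsub2 t ht).1; omega) (hsub2 t ht).2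
      · exact fun t ht => pvGetD_code_lt (by have := (hfacts t ht).1; omega) (hfacts t ht).2
    -- sortedness
    have hpw : (pvPassSpec 0 (pvPassSpec 1 (pvPassSpec 2 subs))).Pairwise
        (fun a b => ¬ (b.drop 0 < a.drop 0)) := by
      apply pvPass_pairwise
      · exact fun t ht => by have := (hsub1 t ht).1; omega
      · apply pvPass_pairwise
        · exact fun t ht => by have := (hsub2 t ht).1; omega
        · apply pvPass_pairwise
          · exact fun t ht => by have := (hfacts t ht).1; omega
          · have : ∀ x ∈ subs, ∀ y ∈ subs, ¬ (y.drop (2 + 1) < x.drop (2 + 1)) := by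
              intro x hx y hy
              have h1 := (hfacts x hx).1
              have h2 := (hfacts y hy).1
              rw [List.drop_eq_nil_of_le (by omega), List.drop_eq_nil_of_le (by omega)]
              simp
            exact List.pairwise_of_forall_mem_list this
    -- conclude with the characterisation of Python's sorted
    apply PySem.List.sorted_id_eq_of_perm_of_pairwise
    · exact hperm.map String.ofList
    · rw [List.pairwise_map]
      apply hpw.imp
      intro a b hab
      simp only [List.drop_zero] at hab
      rw [String.le_iff_toList_le, String.toList_ofList, String.toList_ofList]
      exact not_lt.mp hab
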